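-- pv_equiv track=rewrite | github.com/AkiraDemenech/absolutely_Common_Converter_of_the_Numbers | matrix/det.py | diagonais
-- ===== SOURCE A (Python) =====
-- def diagonais (m, diam = True):
--
-- 	diag = [[0] * len(m) for s in range(diam)]
-- 	raio = len(diag) // 2
--
-- 	for i in range(len(m)):
--
-- 		for j in range(len(m[i])):
--
-- 			if abs(i - j) <= raio:
--
-- 				diag[raio + j - i][i] = m[i][j]
--
-- 	return diag
-- ===== SOURCE B (Python) =====
-- def diagonais(m, diam=True):
--     n = len(m)
--     raio = max(diam, 0) // 2
--     maxlen = max(map(len, m), default=0)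
--     out = []
--     for d in range(diam):
--         off = d - raio
--         lo = min(n, max(0, -off))
--         hi = min(n, maxlen - off)
--         if hi <= lo:
--             out.append([0] * n)
--             continue
--         band = [m[i][i + off] if i + off < len(m[i]) else 0
--                 for i in range(lo, hi)]
--         out.append([0] * lo + band + [0] * (n - hi))
--     return out
-- ===== Notes on version B (the rewrite author's own statement) =====
-- stated objective: alternative
-- what changed: B builds each band row d directly by a closed-form gather diag[d][i] = m[i][i+d-raio], iterating only the clamped column window where the diagonal meets the matrix, instead of scanning every matrix entry and testing |i-j| <= raio to scatter writes into a preallocated zero table.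
import Mathlib
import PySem

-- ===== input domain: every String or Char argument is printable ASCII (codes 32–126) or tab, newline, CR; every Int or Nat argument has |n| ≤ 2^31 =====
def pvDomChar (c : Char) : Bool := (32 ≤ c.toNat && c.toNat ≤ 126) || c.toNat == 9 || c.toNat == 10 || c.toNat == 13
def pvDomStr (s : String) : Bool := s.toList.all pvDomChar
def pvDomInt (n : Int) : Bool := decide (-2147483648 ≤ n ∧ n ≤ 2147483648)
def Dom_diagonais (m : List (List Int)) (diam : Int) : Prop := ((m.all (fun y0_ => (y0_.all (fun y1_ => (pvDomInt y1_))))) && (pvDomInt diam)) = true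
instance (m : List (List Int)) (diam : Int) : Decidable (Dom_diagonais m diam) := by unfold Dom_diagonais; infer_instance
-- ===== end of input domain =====

-- B extracts the band by direct index arithmetic (diag[d][i] = m[i][i+d-raio]) instead of
-- scanning every matrix entry and testing the band condition; objective: alternative traversal.

-- ===== PORT A =====
-- diag[raio+j-i][i] = m[i][j]: under the guard |i-j| ≤ raio the index raio+j-i is ≥ 0,
-- so .toNat is exact; an index ≥ len(diag) (where Python raises, excluded by Pre_) is a no-op set.
def pvSet2 (L : List (List Int)) (d i : Nat) (v : Int) : List (List Int) :=
  L.set d ((L.getD d []).set i v)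

def diagonais (m : List (List Int)) (diam : Int) : List (List Int) :=
  let diag := (List.range (max diam 0).toNat).map (fun _ => List.replicate m.length (0 : Int))
  let raio := diag.length / 2
  (List.range m.length).foldl (fun acc (i : Nat) =>
    (List.range ((m.getD i []).length)).foldl (fun acc2 (j : Nat) =>
      if ((i : Int) - (j : Int)).natAbs ≤ raio then
        pvSet2 acc2 (((raio : Int) + j - i).toNat) i ((m.getD i []).getD j 0)
      else acc2) acc) diag

-- ===== PORT B =====
-- max(map(len, m), default=0) is ported with PySem.List.maxD; indices i and i+off are
-- nonnegative on the ranges Source B iterates (i >= lo >= -off), so .toNat is exact there.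
def diagonais_alt (m : List (List Int)) (diam : Int) : List (List Int) :=
  let n := m.length
  let raio := (max diam 0).toNat / 2
  let maxlen := PySem.List.maxD (m.map List.length) id 0
  (List.range (max diam 0).toNat).map (fun (d : Nat) =>
    let off : Int := (d : Int) - (raio : Int)
    let lo : Nat := min n (max 0 (-off)).toNat
    let hi : Int := min (n : Int) ((maxlen : Int) - off)
    if hi ≤ (lo : Int) then List.replicate n (0 : Int)
    else
      let band := (PySem.List.pyRange (lo : Int) hi 1).map (fun (i : Int) =>
        if i + off < ((m.getD i.toNat []).length : Int) then
          (m.getD i.toNat []).getD (i + off).toNat 0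
        else 0)
      List.replicate lo (0 : Int) ++ band ++ List.replicate (n - hi.toNat) (0 : Int))

-- ===== PRECONDITION & SPEC =====
-- Pre_ excludes exactly the inputs where Python A raises IndexError: band height max(diam,0)
-- even (including diam ≤ 0) while some row i has an element at column i + max(diam,0)//2.
def Pre_diagonais (m : List (List Int)) (diam : Int) : Prop :=
  (max diam 0).toNat % 2 = 1 ∨
    ∀ i ∈ List.range m.length, (m.getD i []).length ≤ i + (max diam 0).toNat / 2
instance (m : List (List Int)) (diam : Int) : Decidable (Pre_diagonais m diam) := by
  unfold Pre_diagonais; infer_instance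

def pvWitness_diagonais : List (List Int) × Int := ([[1, 2, 3], [4, 5, 6], [7, 8, 9]], 3)

def Spec_diagonais (m : List (List Int)) (diam : Int) (out : List (List Int)) : Prop := out = diagonais_alt m diam
instance (m : List (List Int)) (diam : Int) (out : List (List Int)) : Decidable (Spec_diagonais m diam out) := by unfold Spec_diagonais; infer_instance

-- ===== CLAIM (what is proved, stated in full; the proofs are below) =====
def Claim_equal_diagonais : Prop := ∀ (m : List (List Int)) (diam : Int), Dom_diagonais m diam → Pre_diagonais m diam → Spec_diagonais m diam (diagonais m diam)

-- ===== LEMMAS AND PROOFS =====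

def pvGet2 (L : List (List Int)) (d i : Nat) : Int := (L.getD d []).getD i 0

-- proof-only restatement of A's loop body / loops (definitionally equal to the port's lambdas)
def pvStepA (m : List (List Int)) (r i : Nat) (acc : List (List Int)) (j : Nat) : List (List Int) :=
  if ((i : Int) - (j : Int)).natAbs ≤ r then
    pvSet2 acc (((r : Int) + j - i).toNat) i ((m.getD i []).getD j 0)
  else acc

def pvOuterA (m : List (List Int)) (r : Nat) (acc : List (List Int)) (i : Nat) : List (List Int) :=
  (List.range ((m.getD i []).length)).foldl (pvStepA m r i) acc

def pvRowsOK (D n : Nat) (acc : List (List Int)) : Prop :=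
  acc.length = D ∧ ∀ d, d < D → (acc.getD d []).length = n

theorem diagonais_eq (m : List (List Int)) (diam : Int) :
    diagonais m diam =
      (List.range m.length).foldl (pvOuterA m ((max diam 0).toNat / 2))
        ((List.range (max diam 0).toNat).map (fun _ => List.replicate m.length (0 : Int))) := by
  simp only [diagonais, List.length_map, List.length_range]
  rfl

theorem pvSet2_length (L : List (List Int)) (d i : Nat) (v : Int) :
    (pvSet2 L d i v).length = L.length := by
  simp [pvSet2]

theorem pvSet2_row_length (L : List (List Int)) (d i d' : Nat) (v : Int) :
    ((pvSet2 L d i v).getD d' []).length = (L.getD d' []).length := by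
  unfold pvSet2 List.getD
  by_cases hd : d < L.length
  · by_cases hdd : d = d'
    · subst hdd
      rw [List.getElem?_set_self hd, List.getElem?_eq_getElem hd]
      simp
    · rw [List.getElem?_set_ne hdd]
  · rw [List.set_eq_of_length_le (by omega)]

theorem pvGet2_set2 (L : List (List Int)) (d i d' i' : Nat) (v : Int) :
    pvGet2 (pvSet2 L d i v) d' i' =
      if d = d' ∧ i = i' ∧ d < L.length ∧ i < (L.getD d []).length then v
      else pvGet2 L d' i' := by
  unfold pvGet2 pvSet2 List.getD
  by_cases hd : d < L.length
  · have hrow : L[d]?.getD ([] : List Int) = L[d] := by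
      rw [List.getElem?_eq_getElem hd]; rfl
    simp only [hrow]
    by_cases hdd : d = d'
    · subst hdd
      rw [List.getElem?_set_self hd, Option.getD_some]
      by_cases hii : i = i'
      · subst hii
        by_cases hi : i < L[d].length
        · rw [if_pos ⟨rfl, rfl, hd, hi⟩, List.getElem?_set_self hi, Option.getD_some]
        · rw [List.set_eq_of_length_le (by omega), if_neg (by tauto), hrow]
      · rw [List.getElem?_set_ne hii, if_neg (by tauto), hrow]
    · rw [List.getElem?_set_ne hdd, if_neg (by tauto)]
  · rw [List.set_eq_of_length_le (by omega), if_neg (by intro h; exact absurd h.2.2.1 (by omega))]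

theorem pvStepA_rowsOK (m : List (List Int)) (r i D n : Nat) (acc : List (List Int)) (j : Nat)
    (h : pvRowsOK D n acc) : pvRowsOK D n (pvStepA m r i acc j) := by
  unfold pvStepA
  split
  · exact ⟨by rw [pvSet2_length]; exact h.1, fun d hd => by rw [pvSet2_row_length]; exact h.2 d hd⟩
  · exact h

theorem pvInner_rowsOK (m : List (List Int)) (r i D n : Nat) (js : List Nat)
    (acc : List (List Int)) (h : pvRowsOK D n acc) :
    pvRowsOK D n (js.foldl (pvStepA m r i) acc) := by
  induction js generalizing acc with
  | nil => exact h
  | cons j js ih => exact ih _ (pvStepA_rowsOK m r i D n acc j h)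

theorem pvOuter_rowsOK (m : List (List Int)) (r D n : Nat) (is : List Nat)
    (acc : List (List Int)) (h : pvRowsOK D n acc) :
    pvRowsOK D n (is.foldl (pvOuterA m r) acc) := by
  induction is generalizing acc with
  | nil => exact h
  | cons i is ih => exact ih _ (pvInner_rowsOK m r i D n _ acc h)

-- the inner loop writes only column i, and cell (d,i) ends with the band value of diagonal d
theorem pvInner_char (m : List (List Int)) (r i D n : Nat) (hi : i < n) :
    ∀ (Lb : Nat) (acc : List (List Int)), pvRowsOK D n acc → ∀ (d i' : Nat),
      pvGet2 ((List.range Lb).foldl (pvStepA m r i) acc) d i' =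
        if i' = i ∧ d < D ∧ d ≤ 2 * r ∧ 0 ≤ (i : Int) + d - r ∧ (i : Int) + d - r < (Lb : Int) then
          (m.getD i []).getD ((i : Int) + d - r).toNat 0
        else pvGet2 acc d i' := by
  intro Lb
  induction Lb with
  | zero =>
    intro acc h d i'
    simp only [List.range_zero, List.foldl_nil]
    rw [if_neg (by rintro ⟨_, _, _, h4, h5⟩; omega)]
  | succ Lb ih =>
    intro acc h d i'
    rw [List.range_succ, List.foldl_append, List.foldl_cons, List.foldl_nil]
    have hMok : pvRowsOK D n ((List.range Lb).foldl (pvStepA m r i) acc) :=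
      pvInner_rowsOK m r i D n _ acc h
    set M := (List.range Lb).foldl (pvStepA m r i) acc with hM
    unfold pvStepA
    by_cases hc : ((i : Int) - (Lb : Int)).natAbs ≤ r
    · rw [if_pos hc, pvGet2_set2]
      by_cases hhit : ((r : Int) + Lb - i).toNat = d ∧ i = i' ∧ d < D
      · obtain ⟨hd1, hii, hd3⟩ := hhit
        subst hd1; subst hii
        rw [if_pos ⟨rfl, rfl, by rw [hMok.1]; omega, by rw [hMok.2 _ hd3]; exact hi⟩]
        rw [if_pos ⟨rfl, hd3, by omega, by omega, by omega⟩]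
        congr 1
        omega
      · rw [if_neg (by
          rw [hMok.1]
          rintro ⟨h1, h2, h3, _⟩
          exact hhit ⟨h1, h2, by omega⟩)]
        rw [ih acc h d i']
        have hiff : (i' = i ∧ d < D ∧ d ≤ 2 * r ∧ 0 ≤ (i : Int) + d - r ∧
              (i : Int) + d - r < ((Lb + 1 : Nat) : Int)) ↔
            (i' = i ∧ d < D ∧ d ≤ 2 * r ∧ 0 ≤ (i : Int) + d - r ∧
              (i : Int) + d - r < (Lb : Int)) := by
          constructor
          · rintro ⟨rfl, h2, h3, h4, h5⟩
            refine ⟨rfl, h2, h3, h4, ?_⟩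
            by_contra hge
            exact hhit ⟨by omega, rfl, h2⟩
          · rintro ⟨rfl, h2, h3, h4, h5⟩
            exact ⟨rfl, h2, h3, h4, by omega⟩
        rw [if_congr hiff rfl rfl]
    · rw [if_neg hc, ih acc h d i']
      have hiff : (i' = i ∧ d < D ∧ d ≤ 2 * r ∧ 0 ≤ (i : Int) + d - r ∧
            (i : Int) + d - r < ((Lb + 1 : Nat) : Int)) ↔
          (i' = i ∧ d < D ∧ d ≤ 2 * r ∧ 0 ≤ (i : Int) + d - r ∧
            (i : Int) + d - r < (Lb : Int)) := by
        constructor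
        · rintro ⟨rfl, h2, h3, h4, h5⟩
          refine ⟨rfl, h2, h3, h4, ?_⟩
          by_contra hge
          exact hc (by omega)
        · rintro ⟨rfl, h2, h3, h4, h5⟩
          exact ⟨rfl, h2, h3, h4, by omega⟩
      rw [if_congr hiff rfl rfl]

-- after the outer loop over rows 0..k-1, cell (d,i') holds the band value for every i' < k
theorem pvOuter_char (m : List (List Int)) (r D n : Nat) :
    ∀ (k : Nat), k ≤ n → ∀ (acc : List (List Int)), pvRowsOK D n acc → ∀ (d i' : Nat),
      pvGet2 ((List.range k).foldl (pvOuterA m r) acc) d i' =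
        if i' < k ∧ d < D ∧ d ≤ 2 * r ∧ 0 ≤ (i' : Int) + d - r ∧
            (i' : Int) + d - r < ((m.getD i' []).length : Int) then
          (m.getD i' []).getD ((i' : Int) + d - r).toNat 0
        else pvGet2 acc d i' := by
  intro k
  induction k with
  | zero =>
    intro _ acc h d i'
    simp only [List.range_zero, List.foldl_nil]
    rw [if_neg (by rintro ⟨h1, _⟩; omega)]
  | succ k ih =>
    intro hk acc h d i'
    rw [List.range_succ, List.foldl_append, List.foldl_cons, List.foldl_nil]
    have hMok : pvRowsOK D n ((List.range k).foldl (pvOuterA m r) acc) :=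
      pvOuter_rowsOK m r D n _ acc h
    set M := (List.range k).foldl (pvOuterA m r) acc with hM
    rw [pvOuterA, pvInner_char m r k D n (by omega) _ M hMok d i']
    by_cases hik : i' = k
    · subst hik
      by_cases hcnd : d < D ∧ d ≤ 2 * r ∧ 0 ≤ (i' : Int) + d - r ∧
          (i' : Int) + d - r < ((m.getD i' []).length : Int)
      · rw [if_pos ⟨rfl, hcnd.1, hcnd.2.1, hcnd.2.2.1, hcnd.2.2.2⟩,
          if_pos ⟨by omega, hcnd.1, hcnd.2.1, hcnd.2.2.1, hcnd.2.2.2⟩]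
      · rw [if_neg (by rintro ⟨_, h2⟩; exact hcnd h2),
          if_neg (by rintro ⟨_, h2⟩; exact hcnd h2),
          ih (by omega) acc h d i',
          if_neg (by rintro ⟨h1, h2⟩; omega)]
    · rw [if_neg (by rintro ⟨h1, _⟩; exact hik h1), ih (by omega) acc h d i']
      by_cases hcnd : i' < k ∧ d < D ∧ d ≤ 2 * r ∧ 0 ≤ (i' : Int) + d - r ∧
          (i' : Int) + d - r < ((m.getD i' []).length : Int)
      · rw [if_pos hcnd, if_pos ⟨by omega, hcnd.2⟩]
      · rw [if_neg hcnd, if_neg (by rintro ⟨h1, h2⟩; exact hcnd ⟨by omega, h2⟩)]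

theorem pvInit_rowsOK (D n : Nat) :
    pvRowsOK D n (List.replicate D (List.replicate n (0 : Int))) := by
  refine ⟨by simp, fun d hd => ?_⟩
  rw [List.getD, List.getElem?_replicate, if_pos hd]
  simp

theorem pvGet2_init (D n d i : Nat) :
    pvGet2 (List.replicate D (List.replicate n (0 : Int))) d i = 0 := by
  unfold pvGet2
  simp only [List.getD, List.getElem?_replicate]
  by_cases hd : d < D
  · rw [if_pos hd, Option.getD_some, List.getElem?_replicate]
    by_cases hi : i < n
    · rw [if_pos hi, Option.getD_some]
    · rw [if_neg hi, Option.getD_none]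
  · rw [if_neg hd, Option.getD_none]
    rfl

theorem pvGet2_eq_getElem (L : List (List Int)) (d i : Nat) (hd : d < L.length)
    (hi : i < L[d].length) : pvGet2 L d i = L[d][i] := by
  unfold pvGet2
  simp only [List.getD]
  rw [List.getElem?_eq_getElem hd, Option.getD_some, List.getElem?_eq_getElem hi, Option.getD_some]


theorem pvPyRange_one (a b : Int) :
    PySem.List.pyRange a b 1 = (List.range (b - a).toNat).map (fun k : Nat => a + k) := by
  simp only [PySem.List.pyRange, one_ne_zero, if_false, one_mul]
  rcases lt_or_ge a b with h | h
  · simp [h]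
  · simp [not_lt.mpr h, Int.toNat_of_nonpos (by omega : b - a ≤ 0)]

theorem pvMax?_cons_isSome (x : Nat) (xs : List Nat) :
    ∃ v, PySem.List.max? (x :: xs) id = some v := by
  induction xs generalizing x with
  | nil => exact ⟨x, rfl⟩
  | cons y ys ih =>
    have hstep : PySem.List.max? (x :: y :: ys) id =
        PySem.List.max? ((if id x < id y then y else x) :: ys) id := by
      simp only [PySem.List.max?, List.foldl_cons]
      split <;> rfl
    rw [hstep]
    exact ih _

theorem pvMaxD_ge (xs : List Nat) (v : Nat) (hv : v ∈ xs) :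
    v ≤ PySem.List.maxD xs id 0 := by
  unfold PySem.List.maxD
  rcases h : PySem.List.max? xs id with _ | mv
  · exfalso
    cases xs with
    | nil => cases hv
    | cons x xs =>
      obtain ⟨w, hw⟩ := pvMax?_cons_isSome x xs
      rw [h] at hw
      cases hw
  · simpa using PySem.List.max?_isMax h v hv

-- B's clamped band row (with the all-zero short-circuit) equals the per-cell band formula
theorem pvRow_eq (m : List (List Int)) (off : Int) :
    (if min (m.length : Int) (((PySem.List.maxD (m.map List.length) id 0 : Nat) : Int) - off) ≤
        ((min m.length (max 0 (-off)).toNat : Nat) : Int) then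
      List.replicate m.length (0 : Int)
    else
      List.replicate (min m.length (max 0 (-off)).toNat) (0 : Int) ++
        (PySem.List.pyRange ((min m.length (max 0 (-off)).toNat : Nat) : Int)
            (min (m.length : Int) (((PySem.List.maxD (m.map List.length) id 0 : Nat) : Int) - off)) 1).map
          (fun (i : Int) =>
            if i + off < ((m.getD i.toNat []).length : Int) then
              (m.getD i.toNat []).getD (i + off).toNat 0
            else 0) ++
        List.replicate (m.length -
          (min (m.length : Int) (((PySem.List.maxD (m.map List.length) id 0 : Nat) : Int) - off)).toNat) (0 : Int)) =
    (List.range m.length).map (fun (i : Nat) =>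
      if 0 ≤ (i : Int) + off ∧ (i : Int) + off < ((m.getD i []).length : Int) then
        (m.getD i []).getD ((i : Int) + off).toNat 0
      else 0) := by
  set n := m.length with hn
  set maxlen := PySem.List.maxD (m.map List.length) id 0 with hml
  set lo := min n (max 0 (-off)).toNat with hlo
  set hiZ := min (n : Int) ((maxlen : Int) - off) with hhi
  have hmax : ∀ i : Nat, i < n → (m.getD i []).length ≤ maxlen := by
    intro i hi
    refine pvMaxD_ge _ _ ?_
    rw [List.getD, List.getElem?_eq_getElem hi, Option.getD_some]
    exact List.mem_map_of_mem (List.getElem_mem hi)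
  rcases Classical.em (hiZ ≤ (lo : Int)) with hcase | hcase
  · rw [if_pos hcase]
    apply List.ext_getElem
    · simp only [List.length_replicate, List.length_map, List.length_range]
    intro i h1 h2
    simp only [List.length_map, List.length_range] at h2
    rw [List.getElem_map, List.getElem_range, List.getElem_replicate,
      if_neg (by have := hmax i h2; omega)]
  · rw [if_neg hcase, pvPyRange_one]
    apply List.ext_getElem
    · simp only [List.length_append, List.length_replicate, List.length_map, List.length_range]
      omega
    intro i h1 h2
    simp only [List.length_map, List.length_range] at h2
    rw [List.getElem_map, List.getElem_range, List.getElem_append]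
    simp only [List.length_append, List.length_replicate, List.length_map, List.length_range]
    rcases Nat.lt_or_ge i lo with hz1 | hz1
    · rw [dif_pos (by omega), List.getElem_append]
      simp only [List.length_replicate]
      rw [dif_pos hz1, List.getElem_replicate, if_neg (by omega)]
    · rcases Nat.lt_or_ge (i - lo) ((hiZ - (lo : Int)).toNat) with hz2 | hz2
      · rw [dif_pos (by omega), List.getElem_append]
        simp only [List.length_replicate]
        rw [dif_neg (by omega), List.getElem_map, List.getElem_map, List.getElem_range]
        have hcast : (lo : Int) + ((i - lo : Nat) : Int) = (i : Int) := by omega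
        rw [hcast]
        simp only [Int.toNat_natCast]
        by_cases hc : (i : Int) + off < ((m.getD i []).length : Int)
        · rw [if_pos hc, if_pos ⟨by omega, hc⟩]
        · rw [if_neg hc, if_neg (fun h => hc h.2)]
      · rw [dif_neg (by omega), List.getElem_replicate, if_neg (by have := hmax i h2; omega)]

-- B computes the same matrix as the unclamped per-cell band formula
theorem pvAlt_eq (m : List (List Int)) (diam : Int) :
    diagonais_alt m diam =
      (List.range (max diam 0).toNat).map (fun (d : Nat) =>
        (List.range m.length).map (fun (i : Nat) =>
          if 0 ≤ (i : Int) + ((d : Int) - (((max diam 0).toNat / 2 : Nat) : Int)) ∧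
              (i : Int) + ((d : Int) - (((max diam 0).toNat / 2 : Nat) : Int)) <
                ((m.getD i []).length : Int) then
            (m.getD i []).getD ((i : Int) + ((d : Int) - (((max diam 0).toNat / 2 : Nat) : Int))).toNat 0
          else 0)) := by
  simp only [diagonais_alt]
  refine List.map_congr_left fun d _ => ?_
  exact pvRow_eq m ((d : Int) - (((max diam 0).toNat / 2 : Nat) : Int))

-- ===== VERDICT (by name: the statement is the Claim_ definition above) =====
theorem diagonais_spec : Claim_equal_diagonais := by
  unfold Claim_equal_diagonais Spec_diagonais
  intro m diam _ _
  rw [diagonais_eq, List.map_const', List.length_range]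
  have hinit := pvInit_rowsOK (max diam 0).toNat m.length
  have hAok := pvOuter_rowsOK m ((max diam 0).toNat / 2) (max diam 0).toNat m.length
    (List.range m.length)
    (List.replicate (max diam 0).toNat (List.replicate m.length (0 : Int))) hinit
  have hBlen : (diagonais_alt m diam).length = (max diam 0).toNat := by simp [diagonais_alt]
  apply List.ext_getElem (by rw [hAok.1, hBlen])
  intro d hd1 hd2
  have hdD : d < (max diam 0).toNat := by rw [hAok.1] at hd1; exact hd1
  have hAd : ((List.range m.length).foldl (pvOuterA m ((max diam 0).toNat / 2))
      (List.replicate (max diam 0).toNat (List.replicate m.length (0 : Int)))).getD d [] =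
      ((List.range m.length).foldl (pvOuterA m ((max diam 0).toNat / 2))
      (List.replicate (max diam 0).toNat (List.replicate m.length (0 : Int))))[d] := by
    simp only [List.getD]
    rw [List.getElem?_eq_getElem hd1]
    rfl
  have hrowlen : (((List.range m.length).foldl (pvOuterA m ((max diam 0).toNat / 2))
      (List.replicate (max diam 0).toNat (List.replicate m.length (0 : Int))))[d]).length
      = m.length := by rw [← hAd]; exact hAok.2 d hdD
  apply List.ext_getElem
  · rw [hrowlen]; simp [pvAlt_eq]
  intro i hi1 hi2
  have hin : i < m.length := by rwa [hrowlen] at hi1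
  rw [← pvGet2_eq_getElem _ d i hd1 hi1,
    pvOuter_char m ((max diam 0).toNat / 2) (max diam 0).toNat m.length m.length (le_refl _)
      _ hinit d i, pvGet2_init]
  have hrhs : ((diagonais_alt m diam)[d]'hd2)[i]'hi2 =
      (if 0 ≤ (i : Int) + ((d : Int) - (((max diam 0).toNat / 2 : Nat) : Int)) ∧
          (i : Int) + ((d : Int) - (((max diam 0).toNat / 2 : Nat) : Int)) <
            ((m.getD i []).length : Int) then
        (m.getD i []).getD ((i : Int) + ((d : Int) - (((max diam 0).toNat / 2 : Nat) : Int))).toNat 0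
      else 0) := by
    simp [pvAlt_eq]
  rw [hrhs]
  by_cases hc : 0 ≤ (i : Int) + ((d : Int) - (((max diam 0).toNat / 2 : Nat) : Int)) ∧
      (i : Int) + ((d : Int) - (((max diam 0).toNat / 2 : Nat) : Int)) < ((m.getD i []).length : Int)
  · rw [if_pos ⟨hin, hdD, by omega, by omega, by omega⟩, if_pos hc]
    have hidx : ((i : Int) + d - ((max diam 0).toNat / 2 : Nat)).toNat =
        ((i : Int) + ((d : Int) - (((max diam 0).toNat / 2 : Nat) : Int))).toNat := by omega
    rw [hidx]
  · rw [if_neg (by rintro ⟨_, _, _, h4, h5⟩; exact hc ⟨by omega, by omega⟩), if_neg hc]
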